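-- pv_equiv track=rewrite | github.com/paffon/Glyph | src/tools/static_code_analysis.py | get_minimal_unique_paths
-- ===== SOURCE A (Python) =====
-- from typing import Dict, List, Any, Optional
--
-- def get_minimal_unique_paths(file_paths: List[str]) -> Dict[str, str]:
--     """
--     Generate minimal unique paths for a list of file paths.
--     Returns a dict mapping full path to minimal unique suffix.
--     """
--     if not file_paths:
--         return {}
--
--     # Normalize paths to use forward slashes
--     normalized = {p: p.replace('\\', '/') for p in file_paths}
--
--     # Split each path into components (in reverse order)
--     path_components = {}
--     for full_path, norm_path in normalized.items():
--         parts = norm_path.split('/')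
--         path_components[full_path] = list(reversed(parts))
--
--     # Build minimal paths by adding components until unique
--     minimal_paths = {}
--     for full_path in file_paths:
--         components = path_components[full_path]
--
--         # Start with just the filename
--         for depth in range(1, len(components) + 1):
--             candidate = '/'.join(reversed(components[:depth]))
--
--             # Check if this candidate is unique
--             is_unique = True
--             for other_path in file_paths:
--                 if other_path == full_path:
--                     continue
--                 other_components = path_components[other_path]
--                 other_candidate = '/'.join(reversed(other_components[:depth]))
--                 if candidate == other_candidate:
--                     is_unique = False
--                     break
--
--             if is_unique:
--                 minimal_paths[full_path] = candidate
--                 break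
--         else:
--             # Fallback to full path if no unique suffix found
--             minimal_paths[full_path] = normalized[full_path]
--
--     return minimal_paths
-- ===== SOURCE B (Python) =====
-- from typing import List, Dict
--
-- def get_minimal_unique_paths(file_paths: List[str]) -> Dict[str, str]:
--     """
--     Generate minimal unique paths for a list of file paths.
--     Returns a dict mapping full path to minimal unique suffix.
--     One counting pass per depth: count each depth-d suffix in a dict and
--     resolve every still-unresolved path whose suffix count is 1.
--     """
--     if not file_paths:
--         return {}
--
--     distinct = list(dict.fromkeys(file_paths))
--     parts = {p: p.replace('\\', '/').split('/') for p in distinct}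
--     max_depth = max(len(c) for c in parts.values())
--
--     best = {}
--     for depth in range(1, max_depth + 1):
--         counts = {}
--         suffix = {}
--         for p in distinct:
--             s = '/'.join(parts[p][-depth:])
--             suffix[p] = s
--             counts[s] = counts.get(s, 0) + 1
--         for p in distinct:
--             if p not in best and depth <= len(parts[p]) and counts[suffix[p]] == 1:
--                 best[p] = suffix[p]
--
--     return {p: best.get(p, '/'.join(parts[p])) for p in file_paths}
-- ===== Notes on version B (the rewrite author's own statement) =====
-- stated objective: faster
-- what changed: Instead of comparing every path's depth-d suffix against every other path's (an O(N^2) inner scan per depth), B builds one dict of suffix counts per depth over the deduplicated paths and resolves every still-unresolved path whose suffix count is 1, one pass per depth.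
import Mathlib
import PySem

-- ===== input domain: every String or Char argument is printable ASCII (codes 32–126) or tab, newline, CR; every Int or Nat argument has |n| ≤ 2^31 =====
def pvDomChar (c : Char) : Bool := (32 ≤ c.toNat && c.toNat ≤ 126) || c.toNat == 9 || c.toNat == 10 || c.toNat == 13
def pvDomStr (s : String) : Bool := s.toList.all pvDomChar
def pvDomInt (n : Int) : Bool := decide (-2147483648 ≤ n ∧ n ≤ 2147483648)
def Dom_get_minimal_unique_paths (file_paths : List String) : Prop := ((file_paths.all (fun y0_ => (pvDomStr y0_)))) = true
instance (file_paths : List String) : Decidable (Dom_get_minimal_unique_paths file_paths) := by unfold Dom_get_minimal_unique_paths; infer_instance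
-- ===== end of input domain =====

-- B replaces A's per-path inner scan over all other paths by one suffix-count dict per depth;
-- equivalence of the returned association list is proved for every input (A is total).

-- ===== PORT A =====
-- '/'.join(reversed(components[:depth]))
def pvCandA (components : List String) (depth : Int) : String :=
  PySem.Str.join "/" (PySem.List.slice components none (some depth)).reverse

-- the inner 'for other_path in file_paths: …' uniqueness scan (break = short-circuit all)
def pvIsUniqueA (file_paths : List String) (pc : PySem.Dict String (List String))
    (full cand : String) (depth : Int) : Bool :=
  file_paths.all (fun other =>
    other == full || pvCandA ((pc.get? other).getD []) depth != cand)

-- the 'for depth in range(1, len+1): … break / else' loop: some = candidate found, none = else branch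
def pvDepthLoopA (file_paths : List String) (pc : PySem.Dict String (List String))
    (full : String) (components : List String) : List Int → Option String
  | [] => none
  | d :: rest =>
    let cand := pvCandA components d
    if pvIsUniqueA file_paths pc full cand d then some cand
    else pvDepthLoopA file_paths pc full components rest

-- normalized = {p: p.replace('\\', '/') for p in file_paths}
def pvNormalizedA (file_paths : List String) : PySem.Dict String String :=
  file_paths.foldl (fun d p => d.insert p (PySem.Str.replace p "\\" "/")) PySem.Dict.empty

-- path_components[full] = list(reversed(norm.split('/')))
def pvComponentsA (normalized : PySem.Dict String String) : PySem.Dict String (List String) :=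
  normalized.items.foldl (fun d pr =>
    d.insert pr.1 ((PySem.Str.split? pr.2 "/").getD []).reverse) PySem.Dict.empty

def get_minimal_unique_paths (file_paths : List String) : List (String × String) :=
  if file_paths.isEmpty then [] else
    let normalized := pvNormalizedA file_paths
    let path_components := pvComponentsA normalized
    let minimal_paths : PySem.Dict String String :=
      file_paths.foldl (fun d full =>
        let components := (path_components.get? full).getD []
        match pvDepthLoopA file_paths path_components full components
            (PySem.List.pyRange 1 ((components.length : Int) + 1)) with
        | some cand => d.insert full cand
        | none => d.insert full ((normalized.get? full).getD "")) PySem.Dict.empty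
    minimal_paths.items

-- ===== PORT B =====
-- '/'.join(parts[-depth:])
def pvSfxB (parts : List String) (depth : Nat) : String :=
  PySem.Str.join "/" (PySem.List.slice parts (some (-(depth : Int))) none)

-- parts = {p: p.replace('\\', '/').split('/') for p in distinct}
def pvPartsB (distinct : List String) : PySem.Dict String (List String) :=
  distinct.foldl (fun d p =>
    d.insert p ((PySem.Str.split? (PySem.Str.replace p "\\" "/") "/").getD [])) PySem.Dict.empty

-- one pass over distinct: counts[s] = counts.get(s, 0) + 1; suffix[p] = s
def pvCountsSufB (distinct : List String) (parts : PySem.Dict String (List String))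
    (depth : Nat) : PySem.Dict String Int × PySem.Dict String String :=
  distinct.foldl (fun cs p =>
    (cs.1.insert (pvSfxB ((parts.get? p).getD []) depth)
       (cs.1.getD (pvSfxB ((parts.get? p).getD []) depth) 0 + 1),
     cs.2.insert p (pvSfxB ((parts.get? p).getD []) depth)))
    (PySem.Dict.empty, PySem.Dict.empty)

-- second pass: resolve every unresolved path whose suffix count is 1
def pvResolveB (distinct : List String) (parts : PySem.Dict String (List String))
    (best : PySem.Dict String String) (depth : Nat) : PySem.Dict String String :=
  let cs := pvCountsSufB distinct parts depth
  distinct.foldl (fun best p =>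
    if !best.contains p &&
       (decide (depth ≤ ((parts.get? p).getD []).length) &&
        (cs.1.getD ((cs.2.get? p).getD "") 0 == 1))
    then best.insert p ((cs.2.get? p).getD "") else best) best

-- for depth in range(1, max_depth + 1)
def pvBestB (distinct : List String) (parts : PySem.Dict String (List String))
    (maxDepth : Nat) : PySem.Dict String String :=
  (List.range' 1 maxDepth).foldl (fun best depth => pvResolveB distinct parts best depth)
    PySem.Dict.empty

def get_minimal_unique_paths_alt (file_paths : List String) : List (String × String) :=
  if file_paths.isEmpty then [] else
    let distinct := PySem.List.dedup file_paths
    let parts := pvPartsB distinct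
    let maxDepth := (parts.values.map (fun c => c.length)).foldl Nat.max 0
    let best := pvBestB distinct parts maxDepth
    (file_paths.foldl (fun d p =>
      d.insert p ((best.get? p).getD (PySem.Str.join "/" ((parts.get? p).getD [])))) PySem.Dict.empty).items

-- ===== PRECONDITION & SPEC =====
def Spec_get_minimal_unique_paths (file_paths : List String) (out : List (String × String)) : Prop := out = get_minimal_unique_paths_alt file_paths
instance (file_paths : List String) (out : List (String × String)) : Decidable (Spec_get_minimal_unique_paths file_paths out) := by unfold Spec_get_minimal_unique_paths; infer_instance

-- ===== CLAIM (what is proved, stated in full; the proofs are below) =====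
def Claim_equal_get_minimal_unique_paths : Prop := ∀ (file_paths : List String), Dom_get_minimal_unique_paths file_paths → Spec_get_minimal_unique_paths file_paths (get_minimal_unique_paths file_paths)

-- ===== LEMMAS AND PROOFS =====

-- proof-side vocabulary
def pvNorm (p : String) : String := PySem.Str.replace p "\\" "/"
def pvComps (p : String) : List String := (PySem.Str.split? (pvNorm p) "/").getD []
-- the depth-d suffix '/'.join(last d components)
def pvG (p : String) (d : Nat) : String :=
  PySem.Str.join "/" ((pvComps p).drop ((pvComps p).length - d))
-- "no other path has the same depth-d suffix", as a Bool
def pvUb (fps : List String) (p : String) (d : Nat) : Bool :=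
  fps.all (fun q => q == p || !(pvG q d == pvG p d))
-- the value A stores for p
def pvValA (fps : List String) (p : String) : String :=
  match (List.range' 1 (pvComps p).length).find? (fun d => pvUb fps p d) with
  | some d => pvG p d
  | none => pvNorm p
-- the value B stores for p
def pvValB (fps : List String) (maxD : Nat) (p : String) : String :=
  match (List.range' 1 maxD).find?
      (fun d => decide (d ≤ (pvComps p).length) && pvUb fps p d) with
  | some d => pvG p d
  | none => PySem.Str.join "/" (pvComps p)

lemma pv_bool_ext {a b : Bool} (h : a = true ↔ b = true) : a = b := by
  cases a <;> cases b <;> simp_all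

lemma pv_all_congr_mem {α : Type} (l : List α) (f g : α → Bool)
    (h : ∀ x ∈ l, f x = g x) : l.all f = l.all g := by
  induction l with
  | nil => rfl
  | cons a t ih =>
    simp only [List.all_cons]
    rw [h a List.mem_cons_self, ih (fun x hx => h x (List.mem_cons_of_mem _ hx))]

lemma pv_find?_congr_mem {α : Type} (l : List α) (f g : α → Bool)
    (h : ∀ x ∈ l, f x = g x) : l.find? f = l.find? g := by
  induction l with
  | nil => rfl
  | cons a t ih =>
    simp only [List.find?_cons]
    rw [h a List.mem_cons_self]
    cases g a
    · exact ih (fun x hx => h x (List.mem_cons_of_mem _ hx))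
    · rfl

-- a fold that inserts key p with value f p: lookup afterwards
lemma pv_get?_foldl_ins {ν : Type} (f : String → ν) (l : List String)
    (d : PySem.Dict String ν) (k : String) :
    (l.foldl (fun d p => d.insert p (f p)) d).get? k
      = if k ∈ l then some (f k) else d.get? k := by
  induction l generalizing d with
  | nil => simp
  | cons a t ih =>
    simp only [List.foldl_cons, ih, PySem.Dict.get?_insert, List.mem_cons]
    by_cases hk : k ∈ t
    · simp [hk]
    · by_cases ha : k = a <;> simp [hk, ha]

-- slice bridges
lemma pv_candA_eq (p : String) (d : Nat) :
    pvCandA ((pvComps p).reverse) (d : Int) = pvG p d := by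
  unfold pvCandA pvG
  rw [PySem.List.slice_to _ (by positivity)]
  simp only [Int.toNat_natCast]
  rw [List.take_reverse, List.reverse_reverse]

lemma pv_sfxB_eq (p : String) (d : Nat) (hd : 1 ≤ d) :
    pvSfxB (pvComps p) d = pvG p d := by
  unfold pvSfxB pvG
  congr 1
  simp only [PySem.List.slice, PySem.List.clampIdx]
  split
  · split
    · have h1 : (pvComps p).length ≤ d := by omega
      simp [Nat.sub_eq_zero_of_le h1]
      all_goals omega
    · have h2 : ((pvComps p).length : Int) + -(d : Int) = (((pvComps p).length - d : Nat) : Int) := by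
        omega
      rw [h2]
      simp only [Int.toNat_natCast]
      rw [List.take_of_length_le (by simp)]
  · omega

-- pyRange 1 (n+1) = [1, …, n]
lemma pv_pyRange_eq (n : Nat) :
    PySem.List.pyRange 1 ((n : Int) + 1) = (List.range' 1 n).map (fun k : Nat => (k : Int)) := by
  induction n with
  | zero => decide
  | succ m ih =>
    have h : (((m + 1 : Nat) : Int)) + 1 = ((m : Int) + 1) + 1 := by push_cast; ring
    rw [h, PySem.List.pyRange_one_succ_right (by omega), ih, List.range'_concat]
    simp
    all_goals omega

lemma pv_Ub_iff (fps : List String) (p : String) (d : Nat) :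
    pvUb fps p d = true ↔ ∀ q ∈ fps, q ≠ p → pvG q d ≠ pvG p d := by
  simp [pvUb, List.all_eq_true, or_iff_not_imp_left]

-- the count of p's suffix over a duplicate-free list is 1 iff no other element shares it
lemma pv_count_map_eq_one {α β : Type} [DecidableEq α] [DecidableEq β]
    (l : List α) (f : α → β) (p : α) (hl : l.Nodup) (hp : p ∈ l) :
    (l.map f).count (f p) = 1 ↔ ∀ q ∈ l, q ≠ p → f q ≠ f p := by
  induction l with
  | nil => cases hp
  | cons a t ih =>
    rw [List.nodup_cons] at hl
    rcases List.mem_cons.mp hp with h | h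
    · subst h
      have ht : ((t.map f).count (f p) = 0) ↔ ∀ q ∈ t, f q ≠ f p := by
        constructor
        · intro h0 q hq e
          have hm : f p ∈ t.map f := e ▸ List.mem_map_of_mem hq
          rw [List.count_eq_zero] at h0
          exact h0 hm
        · intro hall
          rw [List.count_eq_zero]
          intro hmem
          rcases List.mem_map.mp hmem with ⟨q, hq, e⟩
          exact hall q hq e
      constructor
      · intro hc q hq hqp
        rcases List.mem_cons.mp hq with e | e
        · exact absurd e hqp
        · have : (t.map f).count (f p) = 0 := by
            simp [List.count_cons] at hc
            omega
          exact ht.mp this q e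
      · intro hall
        have : (t.map f).count (f p) = 0 :=
          ht.mpr (fun q hq => hall q (List.mem_cons_of_mem _ hq)
            (fun e => hl.1 (e ▸ hq)))
        simp [List.count_cons, this]
    · have hap : a ≠ p := fun e => hl.1 (e ▸ h)
      have hpos : 1 ≤ (t.map f).count (f p) :=
        List.one_le_count_iff.mpr (List.mem_map_of_mem h)
      constructor
      · intro hc q hq hqp
        rcases List.mem_cons.mp hq with e | e
        · subst e
          intro e
          simp [List.count_cons, e] at hc
          omega
        · have hfa : ¬ (f a = f p) := by
            intro e; simp [List.count_cons, e] at hc; omega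
          have : (t.map f).count (f p) = 1 := by
            simp [List.count_cons, hfa] at hc
            omega
          exact (ih hl.2 h).mp this q e hqp
      · intro hall
        have hfa : ¬ (f a = f p) := hall a List.mem_cons_self hap
        have : (t.map f).count (f p) = 1 :=
          (ih hl.2 h).mpr (fun q hq => hall q (List.mem_cons_of_mem _ hq))
        simp [List.count_cons, hfa, this]

-- ===== split/join roundtrip =====
lemma pv_go_acc (sep : List Char) :
    ∀ (fuel : Nat) (l cur acc), PySem.Chars.splitOn.go sep fuel l cur acc
      = acc.reverse ++ PySem.Chars.splitOn.go sep fuel l cur [] := by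
  intro fuel
  induction fuel with
  | zero => intro l cur acc; simp [PySem.Chars.splitOn.go]
  | succ n ih =>
    intro l cur acc
    cases l with
    | nil => simp [PySem.Chars.splitOn.go]
    | cons c rest =>
      simp only [PySem.Chars.splitOn.go]
      split
      · rw [ih _ _ (cur.reverse :: acc), ih _ _ [cur.reverse]]
        simp
      · rw [ih _ _ acc]

lemma pv_go_ne_nil (sep : List Char) :
    ∀ (fuel : Nat) (l cur acc), PySem.Chars.splitOn.go sep fuel l cur acc ≠ [] := by
  intro fuel
  induction fuel with
  | zero => intro l cur acc; simp [PySem.Chars.splitOn.go]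
  | succ n ih =>
    intro l cur acc
    cases l with
    | nil => simp [PySem.Chars.splitOn.go]
    | cons c rest =>
      simp only [PySem.Chars.splitOn.go]
      split
      · exact ih _ _ _
      · exact ih _ _ _

lemma pv_intercalate_cons {α : Type} (sep a : List α) (xs : List (List α)) (h : xs ≠ []) :
    sep.intercalate (a :: xs) = a ++ sep ++ sep.intercalate xs := by
  cases xs with
  | nil => exact absurd rfl h
  | cons b t => simp [List.intercalate, List.intersperse, List.append_assoc]

lemma pv_go_join (sep : List Char) (hsep : sep ≠ []) :
    ∀ (fuel : Nat) (l cur : List Char), l.length < fuel →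
      sep.intercalate (PySem.Chars.splitOn.go sep fuel l cur []) = cur.reverse ++ l := by
  intro fuel
  induction fuel with
  | zero => intro l cur h; omega
  | succ n ih =>
    intro l cur hl
    cases l with
    | nil => simp [PySem.Chars.splitOn.go, List.intercalate]
    | cons c rest =>
      simp only [PySem.Chars.splitOn.go]
      split
      · next hpre =>
        rw [pv_go_acc]
        rw [show ((cur.reverse :: []).reverse : List (List Char))
              ++ PySem.Chars.splitOn.go sep n (List.drop sep.length (c :: rest)) [] []
            = cur.reverse :: PySem.Chars.splitOn.go sep n (List.drop sep.length (c :: rest)) [] []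
          from by simp]
        rw [pv_intercalate_cons _ _ _ (pv_go_ne_nil _ _ _ _ _)]
        have h1 : 0 < sep.length :=
          Nat.pos_of_ne_zero (fun h0 => hsep (List.eq_nil_of_length_eq_zero h0))
        have hdl : (List.drop sep.length (c :: rest)).length < n := by
          simp only [List.length_drop, List.length_cons] at *
          omega
        rw [ih _ [] hdl]
        have hp2 := (List.prefix_iff_eq_append).mp (List.isPrefixOf_iff_prefix.mp hpre)
        simp only [List.reverse_nil, List.nil_append, List.append_assoc]
        rw [hp2]
      · next hpre =>
        rw [ih rest (c :: cur) (by simp only [List.length_cons] at hl; omega)]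
        simp

lemma pv_join_splitOn (s : List Char) :
    PySem.Chars.join ['/'] (PySem.Chars.splitOn s ['/']) = s := by
  unfold PySem.Chars.join PySem.Chars.splitOn
  rw [pv_go_join ['/'] (by simp) (s.length + 1) s [] (by omega)]
  simp

lemma pv_join_comps (p : String) : PySem.Str.join "/" (pvComps p) = pvNorm p := by
  have hmap := PySem.Str.split?_map (pvNorm p) "/"
  have hsep : ("/" : String).toList = ['/'] := by decide
  rw [hsep, show PySem.Chars.split? (pvNorm p).toList ['/']
        = some (PySem.Chars.splitOn (pvNorm p).toList ['/']) from by
      simp [PySem.Chars.split?]] at hmap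
  apply String.toList_inj.mp
  rw [PySem.Str.toList_join, hsep]
  cases hs : PySem.Str.split? (pvNorm p) "/" with
  | none => rw [hs] at hmap; simp at hmap
  | some L =>
    rw [hs] at hmap
    simp only [Option.map_some, Option.some.injEq] at hmap
    have hc : pvComps p = L := by simp [pvComps, hs]
    rw [hc, hmap, pv_join_splitOn]

-- ===== characterization of A =====
lemma pv_normalized_get? (fps : List String) (q : String) :
    (pvNormalizedA fps).get? q = if q ∈ fps then some (pvNorm q) else none := by
  unfold pvNormalizedA
  rw [pv_get?_foldl_ins (fun p => PySem.Str.replace p "\\" "/") fps PySem.Dict.empty q]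
  simp [pvNorm, PySem.Dict.get?_empty]

lemma pv_components_get? (fps : List String) (q : String) (hq : q ∈ fps) :
    (pvComponentsA (pvNormalizedA fps)).get? q = some ((pvComps q).reverse) := by
  unfold pvComponentsA
  have hnodup : (pvNormalizedA fps).keys.Nodup := by
    unfold pvNormalizedA
    exact PySem.Dict.nodup_keys_foldl_insert fps (fun _ p => PySem.Str.replace p "\\" "/")
      PySem.Dict.empty (by simp [PySem.Dict.keys_empty])
  have hkeys : ∀ k, k ∈ (pvNormalizedA fps).keys ↔ k ∈ fps := by
    intro k
    unfold pvNormalizedA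
    rw [PySem.Dict.keys_foldl_insert fps (fun _ p => PySem.Str.replace p "\\" "/")
      PySem.Dict.empty, PySem.Set.mem_update]
    simp [PySem.Dict.keys_empty]
  rw [PySem.Dict.items_eq_map_keys _ hnodup "", List.foldl_map]
  have hcg : ∀ (acc : PySem.Dict String (List String)), ∀ k ∈ (pvNormalizedA fps).keys,
      (fun (d : PySem.Dict String (List String)) (k : String) =>
        d.insert (k, (pvNormalizedA fps).getD k "").1
          ((PySem.Str.split? (k, (pvNormalizedA fps).getD k "").2 "/").getD []).reverse) acc k
        = (fun (d : PySem.Dict String (List String)) (k : String) =>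
            d.insert k ((pvComps k).reverse)) acc k := by
    intro acc k hk
    have hg : (pvNormalizedA fps).getD k "" = pvNorm k := by
      rw [PySem.Dict.getD_eq_get?_getD, pv_normalized_get?]
      simp [(hkeys k).mp hk]
    simp only [hg]
    rfl
  rw [PySem.List.foldl_congr_mem _ _ _ _ hcg]
  rw [pv_get?_foldl_ins (fun k => (pvComps k).reverse) _ _ q]
  simp [(hkeys q).mpr hq]

lemma pv_isUniqueA_eq (fps : List String) (pc : PySem.Dict String (List String))
    (hpc : ∀ r ∈ fps, pc.get? r = some ((pvComps r).reverse)) (p : String) (d : Nat) :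
    pvIsUniqueA fps pc p (pvG p d) (d : Int) = pvUb fps p d := by
  unfold pvIsUniqueA pvUb
  apply pv_all_congr_mem
  intro q hq
  rw [hpc q hq]
  simp only [Option.getD_some]
  rw [pv_candA_eq]
  simp [bne]

lemma pv_depthLoopA_eq (fps : List String) (pc : PySem.Dict String (List String))
    (hpc : ∀ r ∈ fps, pc.get? r = some ((pvComps r).reverse)) (p : String) (l : List Nat) :
    pvDepthLoopA fps pc p ((pvComps p).reverse) (l.map (fun k : Nat => (k : Int)))
      = (l.find? (fun d => pvUb fps p d)).map (pvG p) := by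
  induction l with
  | nil => rfl
  | cons a t ih =>
    rw [List.map_cons]
    rw [show pvDepthLoopA fps pc p ((pvComps p).reverse)
          ((a : Int) :: t.map (fun k : Nat => (k : Int)))
        = (if pvIsUniqueA fps pc p (pvCandA ((pvComps p).reverse) (a : Int)) (a : Int)
           then some (pvCandA ((pvComps p).reverse) (a : Int))
           else pvDepthLoopA fps pc p ((pvComps p).reverse) (t.map (fun k : Nat => (k : Int))))
      from rfl]
    rw [pv_candA_eq, pv_isUniqueA_eq fps pc hpc p a, List.find?_cons]
    cases h : pvUb fps p a
    · simpa [h] using ih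
    · simp [h]

set_option maxHeartbeats 1000000 in
lemma pv_A_val (fps : List String) (hne : fps ≠ []) :
    get_minimal_unique_paths fps
      = (fps.foldl (fun d p => d.insert p (pvValA fps p)) PySem.Dict.empty).items := by
  have hpc : ∀ r ∈ fps, (pvComponentsA (pvNormalizedA fps)).get? r = some ((pvComps r).reverse) :=
    fun r hr => pv_components_get? fps r hr
  unfold get_minimal_unique_paths
  rw [if_neg (by simpa [List.isEmpty_iff] using hne)]
  dsimp only
  congr 1
  apply PySem.List.foldl_congr_mem
  intro acc full hfull
  simp only [hpc full hfull, Option.getD_some, List.length_reverse]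
  rw [pv_pyRange_eq, pv_depthLoopA_eq fps _ hpc full, pv_normalized_get?]
  simp only [hfull, if_pos]
  unfold pvValA
  cases hf : (List.range' 1 (pvComps full).length).find? (fun d => pvUb fps full d) <;>
    simp [hf]

-- ===== characterization of B =====
lemma pv_parts_get? (fps : List String) (q : String) :
    (pvPartsB (PySem.List.dedup fps)).get? q
      = if q ∈ fps then some (pvComps q) else none := by
  unfold pvPartsB
  rw [pv_get?_foldl_ins (fun p => (PySem.Str.split? (PySem.Str.replace p "\\" "/") "/").getD [])
    (PySem.List.dedup fps) PySem.Dict.empty q]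
  simp [pvComps, pvNorm, PySem.Dict.get?_empty, PySem.List.mem_dedup]

lemma pv_foldl_max_init (l : List Nat) : ∀ (i : Nat), i ≤ l.foldl Nat.max i := by
  induction l with
  | nil => intro i; exact Nat.le_refl i
  | cons b t ih => intro i; exact le_trans (Nat.le_max_left i b) (ih (Nat.max i b))

lemma pv_le_foldl_max (l : List Nat) : ∀ (a i : Nat), a ∈ l → a ≤ l.foldl Nat.max i := by
  induction l with
  | nil => intro a i h; cases h
  | cons b t ih =>
    intro a i h
    rcases List.mem_cons.mp h with e | e
    · subst e; exact le_trans (Nat.le_max_right i a) (pv_foldl_max_init t (Nat.max i a))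
    · exact ih a (Nat.max i b) e

lemma pv_len_le_maxD (fps : List String) (p : String) (hp : p ∈ fps) :
    (pvComps p).length
      ≤ ((pvPartsB (PySem.List.dedup fps)).values.map (fun c => c.length)).foldl Nat.max 0 := by
  have hget : (pvPartsB (PySem.List.dedup fps)).get? p = some (pvComps p) := by
    rw [pv_parts_get?]; simp [hp]
  have hmem : (p, pvComps p) ∈ (pvPartsB (PySem.List.dedup fps)).items :=
    PySem.Dict.mem_items_of_get?_eq_some _ hget
  apply pv_le_foldl_max
  simp only [List.mem_map]
  exact ⟨pvComps p, by simpa [PySem.Dict.values] using List.mem_map_of_mem (f := Prod.snd) hmem, rfl⟩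

-- counts lookups
lemma pv_counts_getD (l : List String) (sf : String → String)
    (d0 : PySem.Dict String Int) (v : String) :
    (l.foldl (fun d p => d.insert (sf p) (d.getD (sf p) 0 + 1)) d0).getD v 0
      = d0.getD v 0 + ((l.map sf).count v : Int) := by
  have h := PySem.Dict.getD_foldl_insert_add_one (l.map sf) d0 v
  rw [List.foldl_map] at h
  exact h

lemma pv_countsSuf_fst (dist : List String) (parts : PySem.Dict String (List String))
    (depth : Nat) (v : String) :
    (pvCountsSufB dist parts depth).1.getD v 0
      = ((dist.map (fun p => pvSfxB ((parts.get? p).getD []) depth)).count v : Int) := by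
  unfold pvCountsSufB
  rw [PySem.List.foldl_prod_mk
    (f := fun (b : PySem.Dict String Int) (p : String) =>
      b.insert (pvSfxB ((parts.get? p).getD []) depth)
        (b.getD (pvSfxB ((parts.get? p).getD []) depth) 0 + 1))
    (g := fun (b : PySem.Dict String String) (p : String) =>
      b.insert p (pvSfxB ((parts.get? p).getD []) depth))]
  rw [pv_counts_getD]
  simp [PySem.Dict.getD_empty]

lemma pv_countsSuf_snd (dist : List String) (parts : PySem.Dict String (List String))
    (depth : Nat) (p : String) (hp : p ∈ dist) :
    (pvCountsSufB dist parts depth).2.get? p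
      = some (pvSfxB ((parts.get? p).getD []) depth) := by
  unfold pvCountsSufB
  rw [PySem.List.foldl_prod_mk
    (f := fun (b : PySem.Dict String Int) (p : String) =>
      b.insert (pvSfxB ((parts.get? p).getD []) depth)
        (b.getD (pvSfxB ((parts.get? p).getD []) depth) 0 + 1))
    (g := fun (b : PySem.Dict String String) (p : String) =>
      b.insert p (pvSfxB ((parts.get? p).getD []) depth))]
  rw [pv_get?_foldl_ins (fun p => pvSfxB ((parts.get? p).getD []) depth) dist PySem.Dict.empty p]
  simp [hp]

-- a fold that conditionally inserts at its own key: untouched keys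
lemma pv_step_notmem (C : String → Bool) (V : String → String) (l : List String)
    (b : PySem.Dict String String) (p : String) (hp : p ∉ l) :
    (l.foldl (fun b q => if !b.contains q && C q then b.insert q (V q) else b) b).get? p
      = b.get? p := by
  induction l generalizing b with
  | nil => rfl
  | cons a t ih =>
    have hpa : p ≠ a := fun h => hp (h ▸ List.mem_cons_self)
    have hpt : p ∉ t := fun h => hp (List.mem_cons_of_mem _ h)
    simp only [List.foldl_cons]
    rw [ih _ hpt]
    split
    · rw [PySem.Dict.get?_insert]; simp [hpa]
    · rfl

lemma pv_step_mem (C : String → Bool) (V : String → String) (l : List String)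
    (hl : l.Nodup) (b : PySem.Dict String String) (p : String) (hp : p ∈ l) :
    (l.foldl (fun b q => if !b.contains q && C q then b.insert q (V q) else b) b).get? p
      = if !b.contains p && C p then some (V p) else b.get? p := by
  induction l generalizing b with
  | nil => cases hp
  | cons a t ih =>
    rw [List.nodup_cons] at hl
    simp only [List.foldl_cons]
    rcases List.mem_cons.mp hp with h | h
    · subst h
      rw [pv_step_notmem C V t _ p hl.1]
      by_cases hc : (!b.contains p && C p) = true
      · simp [hc, PySem.Dict.get?_insert_self]
      · rw [if_neg (by simpa using hc), if_neg (by simpa using hc)]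
    · have hpa : p ≠ a := fun e => hl.1 (e ▸ h)
      have hg : (if !b.contains a && C a then b.insert a (V a) else b).get? p = b.get? p := by
        split
        · rw [PySem.Dict.get?_insert]; simp [hpa]
        · rfl
      have hcont : (if !b.contains a && C a then b.insert a (V a) else b).contains p
          = b.contains p := by
        split
        · rw [PySem.Dict.contains_insert]
          have hb : (p == a) = false := by simpa using hpa
          rw [hb]; simp
        · rfl
      rw [ih hl.2 _ h, hg, hcont]

set_option maxHeartbeats 1000000 in
lemma pv_best_inv (fps : List String) :
    ∀ (D : Nat) (p : String), p ∈ PySem.List.dedup fps →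
      (pvBestB (PySem.List.dedup fps) (pvPartsB (PySem.List.dedup fps)) D).get? p
        = ((List.range' 1 D).find?
            (fun d => decide (d ≤ (pvComps p).length) && pvUb fps p d)).map (pvG p) := by
  intro D
  induction D with
  | zero =>
    intro p hp
    simp [pvBestB, PySem.Dict.get?_empty]
  | succ n ih =>
    intro p hp
    have hmemf : p ∈ fps := (PySem.List.mem_dedup fps p).mp hp
    have hrw : pvBestB (PySem.List.dedup fps) (pvPartsB (PySem.List.dedup fps)) (n + 1)
        = pvResolveB (PySem.List.dedup fps) (pvPartsB (PySem.List.dedup fps))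
            (pvBestB (PySem.List.dedup fps) (pvPartsB (PySem.List.dedup fps)) n)
            (1 + 1 * n) := by
      unfold pvBestB
      rw [List.range'_concat, List.foldl_append]
      rfl
    rw [hrw]
    rw [show pvResolveB (PySem.List.dedup fps) (pvPartsB (PySem.List.dedup fps))
          (pvBestB (PySem.List.dedup fps) (pvPartsB (PySem.List.dedup fps)) n) (1 + 1 * n)
        = (PySem.List.dedup fps).foldl
            (fun b q =>
              if !b.contains q &&
                 (decide ((1 + 1 * n) ≤ (((pvPartsB (PySem.List.dedup fps)).get? q).getD []).length) &&
                  ((pvCountsSufB (PySem.List.dedup fps) (pvPartsB (PySem.List.dedup fps)) (1 + 1 * n)).1.getD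
                    (((pvCountsSufB (PySem.List.dedup fps) (pvPartsB (PySem.List.dedup fps)) (1 + 1 * n)).2.get? q).getD "") 0 == 1))
              then b.insert q
                (((pvCountsSufB (PySem.List.dedup fps) (pvPartsB (PySem.List.dedup fps)) (1 + 1 * n)).2.get? q).getD "")
              else b)
            (pvBestB (PySem.List.dedup fps) (pvPartsB (PySem.List.dedup fps)) n)
      from rfl]
    rw [pv_step_mem _ _ _ (PySem.List.nodup_dedup fps) _ p hp]
    rw [List.range'_concat, List.find?_append]
    have hb0 := ih p hp
    have hcont : (pvBestB (PySem.List.dedup fps) (pvPartsB (PySem.List.dedup fps)) n).contains p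
        = ((List.range' 1 n).find?
            (fun d => decide (d ≤ (pvComps p).length) && pvUb fps p d)).isSome := by
      rw [PySem.Dict.contains_eq_isSome_get?, hb0]
      cases (List.range' 1 n).find? (fun d => decide (d ≤ (pvComps p).length) && pvUb fps p d) <;> simp
    have hparts : (pvPartsB (PySem.List.dedup fps)).get? p = some (pvComps p) := by
      rw [pv_parts_get?]; simp [hmemf]
    have hd1 : 1 ≤ 1 + 1 * n := by omega
    have hsuf : ((pvCountsSufB (PySem.List.dedup fps) (pvPartsB (PySem.List.dedup fps)) (1 + 1 * n)).2.get? p).getD ""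
        = pvG p (1 + 1 * n) := by
      rw [pv_countsSuf_snd _ _ _ p hp]
      simp only [Option.getD_some, hparts]
      exact pv_sfxB_eq p _ hd1
    have hcnt : ((pvCountsSufB (PySem.List.dedup fps) (pvPartsB (PySem.List.dedup fps)) (1 + 1 * n)).1.getD
          (pvG p (1 + 1 * n)) 0 == 1)
        = pvUb fps p (1 + 1 * n) := by
      rw [pv_countsSuf_fst]
      have hmc : (PySem.List.dedup fps).map
            (fun q => pvSfxB (((pvPartsB (PySem.List.dedup fps)).get? q).getD []) (1 + 1 * n))
          = (PySem.List.dedup fps).map (fun q => pvG q (1 + 1 * n)) := by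
        apply List.map_congr_left
        intro q hqd
        have : (pvPartsB (PySem.List.dedup fps)).get? q = some (pvComps q) := by
          rw [pv_parts_get?]; simp [(PySem.List.mem_dedup fps q).mp hqd]
        rw [this]
        simp only [Option.getD_some]
        exact pv_sfxB_eq q _ hd1
      rw [hmc]
      apply pv_bool_ext
      rw [beq_iff_eq, pv_Ub_iff]
      rw [show ((((PySem.List.dedup fps).map (fun q => pvG q (1 + 1 * n))).count
            (pvG p (1 + 1 * n)) : Int) = 1)
          ↔ (((PySem.List.dedup fps).map (fun q => pvG q (1 + 1 * n))).count
            (pvG p (1 + 1 * n)) = 1) from by exact_mod_cast Iff.rfl]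
      have hone := pv_count_map_eq_one (PySem.List.dedup fps) (fun q => pvG q (1 + 1 * n)) p
        (PySem.List.nodup_dedup fps) hp
      constructor
      · intro hc q hq hqp
        exact hone.mp hc q ((PySem.List.mem_dedup fps q).mpr hq) hqp
      · intro hc
        exact hone.mpr (fun q hq hqp => hc q ((PySem.List.mem_dedup fps q).mp hq) hqp)
    rw [hsuf, hparts]
    simp only [Option.getD_some]
    rw [hcnt, hcont, hb0]
    cases hfind : (List.range' 1 n).find?
        (fun d => decide (d ≤ (pvComps p).length) && pvUb fps p d) with
    | some v => simp [hfind]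
    | none =>
      simp only [hfind, Option.isSome_none, Bool.not_false, Bool.true_and, Option.map_none,
        Option.none_or, List.find?_cons, List.find?_nil]
      cases hpred : (decide ((1 + 1 * n) ≤ (pvComps p).length) && pvUb fps p (1 + 1 * n)) <;>
        simp only [Nat.one_mul] at hpred <;> simp [hpred]

set_option maxHeartbeats 1000000 in
lemma pv_B_val (fps : List String) (hne : fps ≠ []) :
    get_minimal_unique_paths_alt fps
      = (fps.foldl (fun d p =>
          d.insert p (pvValB fps
            (((pvPartsB (PySem.List.dedup fps)).values.map (fun c => c.length)).foldl Nat.max 0)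
            p)) PySem.Dict.empty).items := by
  unfold get_minimal_unique_paths_alt
  rw [if_neg (by simpa [List.isEmpty_iff] using hne)]
  dsimp only
  congr 1
  apply PySem.List.foldl_congr_mem
  intro acc p hp
  have hpd : p ∈ PySem.List.dedup fps := (PySem.List.mem_dedup fps p).mpr hp
  rw [pv_best_inv fps _ p hpd]
  rw [pv_parts_get?]
  simp only [hp, if_pos]
  unfold pvValB
  cases hf : (List.range' 1
      (((pvPartsB (PySem.List.dedup fps)).values.map (fun c => c.length)).foldl Nat.max 0)).find?
      (fun d => decide (d ≤ (pvComps p).length) && pvUb fps p d) <;>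
    simp [hf]

-- ===== A's value equals B's value =====
lemma pv_val_eq (fps : List String) (maxD : Nat) (p : String)
    (hM : (pvComps p).length ≤ maxD) :
    pvValA fps p = pvValB fps maxD p := by
  unfold pvValA pvValB
  set L := (pvComps p).length with hL
  have hsplit : List.range' 1 maxD = List.range' 1 L ++ List.range' (1 + 1 * L) (maxD - L) := by
    rw [List.range'_append]
    congr 1
    omega
  rw [hsplit, List.find?_append]
  have h1 : (List.range' 1 L).find? (fun d => decide (d ≤ L) && pvUb fps p d)
      = (List.range' 1 L).find? (fun d => pvUb fps p d) := by
    apply pv_find?_congr_mem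
    intro x hx
    have hxL : x ≤ L := by
      have := (List.mem_range'_1).mp hx
      omega
    simp [hxL]
  have h2 : (List.range' (1 + 1 * L) (maxD - L)).find?
      (fun d => decide (d ≤ L) && pvUb fps p d) = none := by
    rw [List.find?_eq_none]
    intro x hx
    have hxL : ¬ (x ≤ L) := by
      have := (List.mem_range'_1).mp hx
      omega
    simp [hxL]
  rw [h1, h2]
  cases hf : (List.range' 1 L).find? (fun d => pvUb fps p d) with
  | some d => simp
  | none => simp [pv_join_comps]

-- ===== VERDICT (by name: the statement is the Claim_ definition above) =====
set_option maxHeartbeats 1000000 in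
theorem get_minimal_unique_paths_spec : Claim_equal_get_minimal_unique_paths := by
  intro fps _
  unfold Spec_get_minimal_unique_paths
  by_cases hne : fps = []
  · subst hne; rfl
  · rw [pv_A_val fps hne, pv_B_val fps hne]
    congr 1
    apply PySem.List.foldl_congr_mem
    intro acc p hp
    rw [pv_val_eq fps _ p (pv_len_le_maxD fps p hp)]
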